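-- pv_equiv track=rewrite | github.com/ultramind21/Neural-Arithmetic-Diagnostics | neural_arithmetic_diagnostics/final_audit/code_audit/verify_phase4a_source_setup.py | keyword_hits
-- ===== SOURCE A (Python) =====
-- def keyword_hits(lines, keywords, max_hits_per_keyword=3):
--     results = {}
--     lower_lines = [(i, line.rstrip("\n")) for i, line in enumerate(lines, 1)]
--
--     for kw in keywords:
--         hits = []
--         for line_no, text in lower_lines:
--             if kw.lower() in text.lower():
--                 hits.append((line_no, text))
--             if len(hits) >= max_hits_per_keyword:
--                 break
--         results[kw] = hits
--
--     return results
-- ===== SOURCE B (Python) =====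
-- def keyword_hits(lines, keywords, max_hits_per_keyword=3):
--     # One record per distinct keyword, in first-occurrence order:
--     # [keyword, lowered pattern, hits, still_searching]
--     recs = []
--     seen = set()
--     for kw in keywords:
--         if kw not in seen:
--             seen.add(kw)
--             recs.append([kw, kw.lower(), [], True])
--     for i, raw in enumerate(lines, 1):
--         if not any(rec[3] for rec in recs):
--             break
--         text = raw.rstrip("\n")
--         low = text.lower()
--         for rec in recs:
--             if rec[3]:
--                 if rec[1] in low:
--                     rec[2].append((i, text))
--                 if len(rec[2]) >= max_hits_per_keyword:
--                     rec[3] = False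
--     return {rec[0]: rec[2] for rec in recs}
-- ===== Notes on version B (the rewrite author's own statement) =====
-- stated objective: faster
-- what changed: Keyword-outer rescanning of all lines (re-lowercasing every line for every keyword) is replaced by a single line-outer pass that lowercases each line once and updates one record per distinct keyword, deactivating a record when its hit list reaches the cap and stopping as soon as no record is active.
import Mathlib
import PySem

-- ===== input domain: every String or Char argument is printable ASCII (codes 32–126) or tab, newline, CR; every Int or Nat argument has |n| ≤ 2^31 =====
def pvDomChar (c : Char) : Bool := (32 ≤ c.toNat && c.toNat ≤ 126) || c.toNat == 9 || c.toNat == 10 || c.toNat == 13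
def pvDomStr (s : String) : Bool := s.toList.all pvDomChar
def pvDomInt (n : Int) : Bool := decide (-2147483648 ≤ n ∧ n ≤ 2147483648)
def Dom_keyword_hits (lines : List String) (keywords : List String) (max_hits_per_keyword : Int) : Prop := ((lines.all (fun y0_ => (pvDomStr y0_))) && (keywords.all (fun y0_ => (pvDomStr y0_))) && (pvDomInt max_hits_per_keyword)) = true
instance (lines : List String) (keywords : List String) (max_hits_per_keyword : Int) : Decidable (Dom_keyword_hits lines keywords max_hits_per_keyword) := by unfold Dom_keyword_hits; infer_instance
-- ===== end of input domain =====

-- B replaces A's keyword-outer rescan (which re-lowercases every line for every keyword) by a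
-- single line-outer pass that lowercases each line once; objective: faster (constant factor).

-- hand port of Python's str.rstrip("\n"): drop '\n' characters from the right (exact on all strings)
def rstripNl (s : String) : String := String.ofList ((s.toList.reverse.dropWhile (fun c => c == '\n')).reverse)

-- ===== PORT A =====
-- inner 'for line_no, text in lower_lines: … break' loop of A, for one keyword
def aScan (m : Int) (kw : String) : List (Int × String) → List (Int × String) → List (Int × String)
  | [], hits => hits
  | (line_no, text) :: rest, hits =>
    let hits' := if PySem.Str.isIn (PySem.Str.lower kw) (PySem.Str.lower text) then hits ++ [(line_no, text)] else hits
    if m ≤ (hits'.length : Int) then hits' else aScan m kw rest hits'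

def keyword_hits (lines : List String) (keywords : List String) (max_hits_per_keyword : Int) : List (String × List (Int × String)) :=
  let lower_lines := (PySem.List.enumerate lines 1).map (fun p => (p.1, rstripNl p.2))
  (keywords.foldl (fun results kw => PySem.Dict.insert results kw (aScan max_hits_per_keyword kw lower_lines [])) PySem.Dict.empty).items

-- ===== PORT B =====
-- one record per distinct keyword: (keyword, lowered pattern, hits, still_searching)
abbrev KwRec := String × String × List (Int × String) × Bool

def bInit : List String → PySem.Set String → List KwRec → List KwRec
  | [], _, recs => recs
  | kw :: ks, seen, recs =>
    if PySem.Set.contains seen kw then bInit ks seen recs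
    else bInit ks (PySem.Set.add seen kw) (recs ++ [(kw, PySem.Str.lower kw, [], true)])

def bStep (m : Int) (i : Int) (text low : String) (r : KwRec) : KwRec :=
  if r.2.2.2 then
    let h' := if PySem.Str.isIn r.2.1 low then r.2.2.1 ++ [(i, text)] else r.2.2.1
    (r.1, r.2.1, h', !decide (m ≤ (h'.length : Int)))
  else r

def bLoop (m : Int) : List (Int × String) → List KwRec → List KwRec
  | [], recs => recs
  | (i, raw) :: rest, recs =>
    if recs.any (fun r => r.2.2.2) then
      let text := rstripNl raw
      let low := PySem.Str.lower text
      bLoop m rest (recs.map (bStep m i text low))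
    else recs

def keyword_hits_alt (lines : List String) (keywords : List String) (max_hits_per_keyword : Int) : List (String × List (Int × String)) :=
  (bLoop max_hits_per_keyword (PySem.List.enumerate lines 1) (bInit keywords PySem.Set.empty [])).map (fun r => (r.1, r.2.2.1))

-- ===== PRECONDITION & SPEC =====
def Spec_keyword_hits (lines : List String) (keywords : List String) (max_hits_per_keyword : Int) (out : List (String × List (Int × String))) : Prop := out = keyword_hits_alt lines keywords max_hits_per_keyword
instance (lines : List String) (keywords : List String) (max_hits_per_keyword : Int) (out : List (String × List (Int × String))) : Decidable (Spec_keyword_hits lines keywords max_hits_per_keyword out) := by unfold Spec_keyword_hits; infer_instance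

-- ===== CLAIM (what is proved, stated in full; the proofs are below) =====
def Claim_equal_keyword_hits : Prop := ∀ (lines : List String) (keywords : List String) (max_hits_per_keyword : Int), Dom_keyword_hits lines keywords max_hits_per_keyword → Spec_keyword_hits lines keywords max_hits_per_keyword (keyword_hits lines keywords max_hits_per_keyword)

-- ===== LEMMAS AND PROOFS =====

-- the evolution of one record through B's line loop (spec helper for the proofs)
def pScan (m : Int) (pat : String) : List (Int × String) → List (Int × String) × Bool → List (Int × String) × Bool
  | [], s => s
  | (i, raw) :: rest, (h, act) =>
    if act then
      let text := rstripNl raw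
      let h' := if PySem.Str.isIn pat (PySem.Str.lower text) then h ++ [(i, text)] else h
      pScan m pat rest (h', !decide (m ≤ (h'.length : Int)))
    else (h, act)

lemma pScan_inactive (m : Int) (pat : String) (ls : List (Int × String)) (h : List (Int × String)) :
    pScan m pat ls (h, false) = (h, false) := by
  cases ls with
  | nil => rfl
  | cons p rest => obtain ⟨i, raw⟩ := p; simp [pScan]

lemma pScan_fst (m : Int) (kw : String) (ls : List (Int × String)) (h : List (Int × String)) :
    (pScan m (PySem.Str.lower kw) ls (h, true)).1
      = aScan m kw (ls.map (fun p => (p.1, rstripNl p.2))) h := by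
  induction ls generalizing h with
  | nil => rfl
  | cons p rest ih =>
    obtain ⟨i, raw⟩ := p
    simp only [pScan, aScan, List.map_cons, if_true]
    by_cases hm : m ≤ ((if PySem.Str.isIn (PySem.Str.lower kw) (PySem.Str.lower (rstripNl raw)) then h ++ [(i, rstripNl raw)] else h).length : Int)
    · rw [decide_eq_true hm, Bool.not_true, pScan_inactive, if_pos hm]
    · rw [decide_eq_false hm, Bool.not_false, if_neg hm]
      exact ih _

lemma bLoop_eq (m : Int) (ls : List (Int × String)) :
    ∀ recs : List KwRec,
      bLoop m ls recs = recs.map (fun r => (r.1, r.2.1, pScan m r.2.1 ls r.2.2)) := by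
  induction ls with
  | nil =>
    intro recs
    simp [bLoop, pScan]
  | cons p rest ih =>
    obtain ⟨i, raw⟩ := p
    intro recs
    by_cases hany : recs.any (fun r => r.2.2.2)
    · simp only [bLoop, hany, if_true]
      rw [ih, List.map_map]
      refine List.map_congr_left (fun r _ => ?_)
      obtain ⟨kw, pat, h, act⟩ := r
      cases act with
      | true => rfl
      | false =>
        show ((kw, pat, pScan m pat rest (h, false)) : KwRec) = (kw, pat, pScan m pat ((i, raw) :: rest) (h, false))
        rw [pScan_inactive]
        rfl
    · have hanyF : recs.any (fun r => r.2.2.2) = false := Bool.of_not_eq_true hany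
      simp only [bLoop, hanyF, Bool.false_eq_true, if_false]
      have hfalse := List.any_eq_false.mp hanyF
      symm
      calc recs.map (fun r => (r.1, r.2.1, pScan m r.2.1 ((i, raw) :: rest) r.2.2))
          = recs.map (fun r => r) := by
            refine List.map_congr_left (fun r hr => ?_)
            obtain ⟨kw, pat, h, act⟩ := r
            have hact : act = false := by simpa using hfalse _ hr
            subst hact
            show ((kw, pat, (h, false)) : KwRec) = (kw, pat, h, false)
            rfl
        _ = recs := List.map_id' recs

lemma bInit_shape :
    ∀ (ks : List String) (seen : PySem.Set String) (recs : List KwRec),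
      (∀ r ∈ recs, r.2.1 = PySem.Str.lower r.1 ∧ r.2.2 = ([], true)) →
      ∀ r ∈ bInit ks seen recs, r.2.1 = PySem.Str.lower r.1 ∧ r.2.2 = ([], true) := by
  intro ks
  induction ks with
  | nil => intro seen recs hrecs; simpa [bInit] using hrecs
  | cons kw ks ih =>
    intro seen recs hrecs
    by_cases hmem : kw ∈ seen
    · simpa [bInit, hmem] using ih seen recs hrecs
    · have hc : PySem.Set.contains seen kw = false := by
        simp [PySem.Set.contains, hmem]
      simp only [bInit, hc, Bool.false_eq_true, if_false]
      refine ih _ _ (fun r hr => ?_)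
      rcases List.mem_append.mp hr with h1 | h2
      · exact hrecs r h1
      · simp only [List.mem_singleton] at h2
        subst h2; exact ⟨rfl, rfl⟩

lemma foldA_eq_bInit (f : String → List (Int × String)) :
    ∀ (ks : List String) (recs : List KwRec) (d : PySem.Dict String (List (Int × String))) (seen : PySem.Set String),
      d.items = recs.map (fun r => (r.1, f r.1)) →
      seen = recs.map (fun r => r.1) →
      (ks.foldl (fun d kw => PySem.Dict.insert d kw (f kw)) d).items
        = (bInit ks seen recs).map (fun r => (r.1, f r.1)) := by
  intro ks
  induction ks with
  | nil => intro recs d seen hd hseen; simpa [bInit] using hd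
  | cons kw ks ih =>
    intro recs d seen hd hseen
    have hkeys : d.keys = recs.map (fun r => r.1) := by
      simp [PySem.Dict.keys, hd, List.map_map, Function.comp_def]
    by_cases hmem : kw ∈ recs.map (fun r => r.1)
    · have hsmem : kw ∈ seen := hseen ▸ hmem
      have hdc : d.contains kw = true := by
        rw [PySem.Dict.contains_iff_mem_keys, hkeys]; exact hmem
      have hitems : (PySem.Dict.insert d kw (f kw)).items = d.items := by
        rw [PySem.Dict.items_insert_of_contains d (f kw) hdc, hd, List.map_map]
        refine List.map_congr_left (fun r _ => ?_)
        by_cases hbe : r.1 = kw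
        · simp [hbe]
        · simp [hbe]
      have hb : bInit (kw :: ks) seen recs = bInit ks seen recs := by
        simp [bInit, hsmem]
      rw [List.foldl_cons, hb]
      exact ih recs _ seen (hitems.trans hd) hseen
    · have hsmem : kw ∉ seen := fun hc => hmem (hseen ▸ hc)
      have hdc : d.contains kw = false := by
        rw [Bool.eq_false_iff]
        intro hc
        exact hmem (hkeys ▸ (PySem.Dict.contains_iff_mem_keys d kw).mp hc)
      have hb : bInit (kw :: ks) seen recs
          = bInit ks (PySem.Set.add seen kw) (recs ++ [(kw, PySem.Str.lower kw, [], true)]) := by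
        simp [bInit, hsmem]
      rw [List.foldl_cons, hb]
      refine ih (recs ++ [(kw, PySem.Str.lower kw, [], true)]) _ _ ?_ ?_
      · rw [PySem.Dict.items_insert_of_not_contains d (f kw) hdc, hd, List.map_append]
        rfl
      · have hadd : PySem.Set.add seen kw = seen ++ [kw] := by
          simp [PySem.Set.add, PySem.Set.contains, hsmem]
        rw [hadd, hseen, List.map_append]
        rfl

-- ===== VERDICT (by name: the statement is the Claim_ definition above) =====
theorem keyword_hits_spec : Claim_equal_keyword_hits := by
  intro lines keywords m _hdom
  show keyword_hits lines keywords m = keyword_hits_alt lines keywords m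
  have hshape := bInit_shape keywords PySem.Set.empty []
    (by intro r hr; simp at hr)
  unfold keyword_hits keyword_hits_alt
  rw [bLoop_eq, List.map_map]
  rw [foldA_eq_bInit
        (fun kw => aScan m kw ((PySem.List.enumerate lines 1).map (fun p => (p.1, rstripNl p.2))) [])
        keywords [] PySem.Dict.empty PySem.Set.empty rfl rfl]
  refine List.map_congr_left (fun r hr => ?_)
  obtain ⟨hpat, hstate⟩ := hshape r hr
  simp only [Function.comp_def]
  rw [hstate, hpat, pScan_fst]
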